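-- pv_equiv track=rewrite | github.com/joshmullikin/playwright-http | executor/element_finder.py | get_target_variations
-- ===== SOURCE A (Python) =====
-- ELEMENT_TYPE_SUFFIXES = [
--     " link", " button", " btn", " input", " field", " text",
--     " image", " img", " icon", " checkbox", " radio", " dropdown",
--     " menu", " tab", " option", " label", " heading", " title",
-- ]
--
-- def get_target_variations(target: str) -> list[str]:
--     """Generate variations by recursively stripping suffixes.
--
--     Examples:
--         "Password input field" → ["Password input field", "Password input", "Password"]
--         "Submit button" → ["Submit button", "Submit"]
--         "credentials link" → ["credentials link", "credentials"]
--
--     Args: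
--         target: Original target description
--
--     Returns:
--         List of variations from most specific to least
--     """
--     if not target:
--         return []
--
--     variations = [target]
--     current = target
--
--     while True:
--         found = False
--         current_lower = current.lower()
--
--         for suffix in ELEMENT_TYPE_SUFFIXES:
--             if current_lower.endswith(suffix):
--                 stripped = current[: len(current) - len(suffix)].strip()
--                 if stripped and stripped not in variations:
--                     variations.append(stripped)
--                     current = stripped
--                     found = True
--                     break
--
--         if not found:
--             break
--
--     return variations
-- ===== SOURCE B (Python) =====
-- ELEMENT_TYPE_SUFFIX_WORDS = {
--     "link", "button", "btn", "input", "field", "text",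
--     "image", "img", "icon", "checkbox", "radio", "dropdown",
--     "menu", "tab", "option", "label", "heading", "title",
-- }
--
--
-- def get_target_variations(target: str) -> list[str]:
--     variations = []
--     cur = target
--     while cur:
--         variations.append(cur)
--         _head, sep, word = cur.lower().rpartition(" ")
--         if not (sep and word in ELEMENT_TYPE_SUFFIX_WORDS):
--             break
--         stripped = cur[: len(cur) - len(word) - 1].strip()
--         if not stripped:
--             break
--         cur = stripped
--     return variations
-- ===== Notes on version B (the rewrite author's own statement) =====
-- stated objective: alternative
-- what changed: Instead of scanning the 18-entry suffix list each round with a found-flag and a membership test against the growing variations list, B rpartitions the current string at its last space and looks the trailing word up in a set; this is correct because no two suffixes can match the same string (each is a space plus a space-free word), and the membership test is redundant since each step strictly shortens the string.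
import Mathlib
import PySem

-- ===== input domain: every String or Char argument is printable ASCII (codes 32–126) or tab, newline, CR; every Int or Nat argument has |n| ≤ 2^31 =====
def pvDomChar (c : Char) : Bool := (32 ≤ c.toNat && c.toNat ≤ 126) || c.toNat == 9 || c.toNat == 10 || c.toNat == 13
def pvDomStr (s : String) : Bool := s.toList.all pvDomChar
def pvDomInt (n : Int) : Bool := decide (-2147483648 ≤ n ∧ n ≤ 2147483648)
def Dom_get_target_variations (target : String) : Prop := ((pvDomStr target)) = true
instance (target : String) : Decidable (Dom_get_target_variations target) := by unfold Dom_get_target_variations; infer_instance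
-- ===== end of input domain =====

-- B replaces A's per-round scan of the 18-entry suffix list (with a found-flag and a
-- membership test against the growing variations list) by rpartitioning the current
-- string at its last space and looking the trailing word up in a set; objective: alternative.

-- stripping the last k characters of a string (0 < k ≤ its length) and then stripping
-- whitespace leaves a strictly shorter string — cited by both ports' termination proofs
theorem strip_slice_lt (cur : String) (k : Nat) (h1 : 1 ≤ k) (h2 : k ≤ cur.toList.length) :
    (PySem.Str.strip (PySem.Str.slice cur none
      (some (PySem.Str.len cur - (k : Int))))).toList.length < cur.toList.length := by
  have hb : PySem.Str.len cur - (k : Int) = ((cur.toList.length - k : Nat) : Int) := by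
    simp only [PySem.Str.len_eq]; omega
  have hstrip : ∀ cs : List Char, (PySem.Chars.strip cs).length ≤ cs.length := by
    intro cs
    simp only [PySem.Chars.strip, PySem.Chars.rstrip, PySem.Chars.lstrip]
    calc (List.dropWhile PySem.Chars.isspace
            (List.dropWhile PySem.Chars.isspace cs).reverse).reverse.length
        = (List.dropWhile PySem.Chars.isspace
            (List.dropWhile PySem.Chars.isspace cs).reverse).length := by simp
      _ ≤ (List.dropWhile PySem.Chars.isspace cs).reverse.length :=
          List.length_dropWhile_le _ _
      _ = (List.dropWhile PySem.Chars.isspace cs).length := by simp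
      _ ≤ cs.length := List.length_dropWhile_le _ _
  calc (PySem.Str.strip (PySem.Str.slice cur none
          (some (PySem.Str.len cur - (k : Int))))).toList.length
      ≤ (PySem.Str.slice cur none
          (some (PySem.Str.len cur - (k : Int)))).toList.length := by
        simp only [PySem.Str.toList_strip]; exact hstrip _
    _ < cur.toList.length := by
        rw [PySem.Str.toList_slice, PySem.Chars.slice_eq_listSlice, hb,
          PySem.List.slice_to_natCast]
        simp only [List.length_take]
        omega

-- ===== PORT A =====
def elementTypeSuffixes : List String := [
  " link", " button", " btn", " input", " field", " text",
  " image", " img", " icon", " checkbox", " radio", " dropdown",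
  " menu", " tab", " option", " label", " heading", " title"]

-- every suffix in the table is non-empty (used for termination of port A)
theorem suffixes_ne_nil : ∀ suf ∈ elementTypeSuffixes, suf.toList ≠ [] := by decide

-- the `stripped` value A computes: current[: len(current) - len(suffix)].strip()
def strippedOf (current suffix : String) : String :=
  PySem.Str.strip (PySem.Str.slice current none
    (some (PySem.Str.len current - PySem.Str.len suffix)))

-- stripping a matched non-empty suffix strictly shortens the string (termination of port A)
theorem strippedOf_lt (current suffix : String)
    (hs : suffix.toList ≠ [])
    (he : PySem.Str.endswith (PySem.Str.lower current) suffix = true) :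
    (strippedOf current suffix).toList.length < current.toList.length := by
  have hsuf : suffix.toList <:+ (PySem.Str.lower current).toList := by
    rw [PySem.Str.endswith_eq] at he
    exact (PySem.Chars.endswith_iff _ _).mp he
  have hlen : suffix.toList.length ≤ current.toList.length := by
    have h := hsuf.length_le
    simpa [PySem.Str.toList_lower, PySem.Chars.lower] using h
  have hm : 0 < suffix.toList.length := List.length_pos_iff.mpr hs
  have hk : PySem.Str.len suffix = ((suffix.toList.length : Nat) : Int) := by
    simp only [PySem.Str.len_eq]
  rw [strippedOf, hk]
  exact strip_slice_lt current suffix.toList.length hm hlen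

-- A's inner `for suffix in ELEMENT_TYPE_SUFFIXES` scan: first suffix whose stripped
-- prefix is non-empty AND not already in `variations`
def findSuffixA (current : String) (variations : List String) :
    List String → Option String
  | [] => none
  | suffix :: rest =>
    if PySem.Str.endswith (PySem.Str.lower current) suffix then
      let stripped := strippedOf current suffix
      if stripped != "" && !(variations.contains stripped) then some stripped
      else findSuffixA current variations rest
    else findSuffixA current variations rest

theorem findSuffixA_lt {current s : String} {variations L : List String}
    (hL : ∀ suf ∈ L, suf.toList ≠ [])
    (h : findSuffixA current variations L = some s) :
    s.toList.length < current.toList.length := by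
  induction L with
  | nil => simp [findSuffixA] at h
  | cons suffix rest ih =>
    unfold findSuffixA at h
    split at h
    next he =>
      simp only [] at h
      split at h
      next hc =>
        injection h with h
        subst h
        exact strippedOf_lt current suffix (hL suffix (by simp)) he
      next => exact ih (fun suf hm => hL suf (by simp [hm])) h
    next => exact ih (fun suf hm => hL suf (by simp [hm])) h

-- A's `while True` loop: state = (variations, current)
def loopA (variations : List String) (current : String) : List String :=
  match h : findSuffixA current variations elementTypeSuffixes with
  | some stripped => loopA (variations ++ [stripped]) stripped
  | none => variations
termination_by current.toList.length
decreasing_by exact findSuffixA_lt suffixes_ne_nil h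

def get_target_variations (target : String) : List String :=
  if target = "" then []
  else loopA [target] target

-- ===== PORT B =====
-- the set of trailing element-type words Source B looks the rpartitioned word up in
def suffixWords : PySem.Set String := PySem.Set.ofList [
  "link", "button", "btn", "input", "field", "text",
  "image", "img", "icon", "checkbox", "radio", "dropdown",
  "menu", "tab", "option", "label", "heading", "title"]

-- word of cur.lower().rpartition(" "): the characters after the last space
def lastToken (cs : List Char) : List Char :=
  (cs.reverse.takeWhile (· ≠ ' ')).reverse

-- if cs contains a space, its last token is strictly shorter (termination of port B)
theorem lastToken_len_lt {cs : List Char} (h : ' ' ∈ cs) :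
    (lastToken cs).length < cs.length := by
  have hd : cs.reverse.dropWhile (· ≠ ' ') ≠ [] := by
    rw [Ne, List.dropWhile_eq_nil_iff]
    intro hall
    have := hall ' ' (List.mem_reverse.mpr h)
    simp at this
  have hsplit : (cs.reverse.takeWhile (· ≠ ' ')).length
      + (cs.reverse.dropWhile (· ≠ ' ')).length = cs.length := by
    have h2 : cs.reverse.takeWhile (· ≠ ' ') ++ cs.reverse.dropWhile (· ≠ ' ')
        = cs.reverse := List.takeWhile_append_dropWhile
    have h3 := congrArg List.length h2
    rw [List.length_append, List.length_reverse] at h3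
    exact h3
  have hpos : 0 < (cs.reverse.dropWhile (· ≠ ' ')).length :=
    List.length_pos_iff.mpr hd
  simp only [lastToken, List.length_reverse]
  omega

-- Source B's while-loop: append cur, rpartition at the last space, test the word, strip
def bLoop (variations : List String) (cur : String) : List String :=
  if cur = "" then variations
  else
    let variations := variations ++ [cur]
    let low := (PySem.Str.lower cur).toList
    let word := lastToken low
    if h : (' ' ∈ low) ∧ (String.ofList word ∈ suffixWords) then
      let stripped := PySem.Str.strip (PySem.Str.slice cur none
        (some (PySem.Str.len cur - (word.length : Int) - 1)))
      if stripped = "" then variations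
      else bLoop variations stripped
    else variations
termination_by cur.toList.length
decreasing_by
  have hlow : (PySem.Str.lower cur).toList.length = cur.toList.length := by
    simp [PySem.Str.toList_lower, PySem.Chars.lower]
  have hlt : (lastToken (PySem.Str.lower cur).toList).length
      < (PySem.Str.lower cur).toList.length := lastToken_len_lt h.1
  have hcast : PySem.Str.len cur - ((lastToken (PySem.Str.lower cur).toList).length : Int) - 1
      = PySem.Str.len cur - (((lastToken (PySem.Str.lower cur).toList).length + 1 : Nat) : Int) := by
    push_cast; ring
  calc (PySem.Str.strip (PySem.Str.slice cur none
        (some (PySem.Str.len cur - ((lastToken (PySem.Str.lower cur).toList).length : Int) - 1)))).toList.length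
      < cur.toList.length := by
        rw [hcast]
        exact strip_slice_lt cur _ (by omega) (by omega)

def get_target_variations_alt (target : String) : List String :=
  bLoop [] target

-- ===== PRECONDITION & SPEC =====
def Spec_get_target_variations (target : String) (out : List String) : Prop := out = get_target_variations_alt target
instance (target : String) (out : List String) : Decidable (Spec_get_target_variations target out) := by unfold Spec_get_target_variations; infer_instance

-- ===== CLAIM (what is proved, stated in full; the proofs are below) =====
def Claim_equal_get_target_variations : Prop := ∀ (target : String), Dom_get_target_variations target → Spec_get_target_variations target (get_target_variations target)

-- ===== LEMMAS AND PROOFS =====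

-- proof-side description of one step of B's loop
def bStep (cur : String) : Option String :=
  if (' ' ∈ (PySem.Str.lower cur).toList)
      ∧ (String.ofList (lastToken (PySem.Str.lower cur).toList) ∈ suffixWords) then
    if PySem.Str.strip (PySem.Str.slice cur none
        (some (PySem.Str.len cur
          - ((lastToken (PySem.Str.lower cur).toList).length : Int) - 1))) = ""
      then none
      else some (PySem.Str.strip (PySem.Str.slice cur none
        (some (PySem.Str.len cur
          - ((lastToken (PySem.Str.lower cur).toList).length : Int) - 1))))
  else none

theorem bLoop_unfold (variations : List String) (cur : String) (hcur : cur ≠ "") :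
    bLoop variations cur = match bStep cur with
      | some s => bLoop (variations ++ [cur]) s
      | none => variations ++ [cur] := by
  rw [bLoop, if_neg hcur, bStep]
  by_cases h1 : (' ' ∈ (PySem.Str.lower cur).toList)
      ∧ (String.ofList (lastToken (PySem.Str.lower cur).toList) ∈ suffixWords)
  · rw [dif_pos h1, if_pos h1]
    by_cases h2 : PySem.Str.strip (PySem.Str.slice cur none
        (some (PySem.Str.len cur
          - ((lastToken (PySem.Str.lower cur).toList).length : Int) - 1))) = ""
    · rw [if_pos h2, if_pos h2]
    · rw [if_neg h2, if_neg h2]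
  · rw [dif_neg h1, if_neg h1]

theorem bStep_ne_empty {cur s : String} (h : bStep cur = some s) : s ≠ "" := by
  unfold bStep at h
  split_ifs at h with h1 h2
  rw [← Option.some.inj h]
  exact h2

theorem bStep_lt {cur s : String} (h : bStep cur = some s) :
    s.toList.length < cur.toList.length := by
  unfold bStep at h
  split_ifs at h with h1 h2
  rw [← Option.some.inj h]
  have hlow : (PySem.Str.lower cur).toList.length = cur.toList.length := by
    simp [PySem.Str.toList_lower, PySem.Chars.lower]
  have hlt := lastToken_len_lt h1.1
  have hcast : PySem.Str.len cur - ((lastToken (PySem.Str.lower cur).toList).length : Int) - 1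
      = PySem.Str.len cur - (((lastToken (PySem.Str.lower cur).toList).length + 1 : Nat) : Int) := by
    push_cast; ring
  rw [hcast]
  exact strip_slice_lt cur _ (by omega) (by omega)

-- a space-free non-empty word preceded by a space is a suffix iff it is the last token
theorem suffix_cons_iff (cs wl : List Char) (_hne : wl ≠ []) (hsp : ' ' ∉ wl) :
    ((' ' :: wl) <:+ cs) ↔ (' ' ∈ cs ∧ lastToken cs = wl) := by
  rw [← List.reverse_prefix, lastToken]
  have hrev : (' ' :: wl).reverse = wl.reverse ++ [' '] := by simp
  rw [hrev]
  constructor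
  · rintro ⟨t, ht⟩
    have hall : ∀ x ∈ wl.reverse, (fun c => decide (c ≠ ' ')) x = true := by
      intro x hx
      have : x ∈ wl := List.mem_reverse.mp hx
      simp only [decide_eq_true_eq]
      intro hxe; exact hsp (hxe ▸ this)
    have htw : cs.reverse.takeWhile (· ≠ ' ') = wl.reverse := by
      rw [← ht, List.append_assoc, List.takeWhile_append]
      rw [List.takeWhile_eq_self_iff.mpr hall]
      simp
    constructor
    · rw [← List.mem_reverse, ← ht]; simp
    · rw [htw, List.reverse_reverse]
  · rintro ⟨hmem, htok⟩
    have htw : cs.reverse.takeWhile (· ≠ ' ') = wl.reverse := by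
      have := congrArg List.reverse htok
      simpa using this
    have hd : cs.reverse.dropWhile (· ≠ ' ') ≠ [] := by
      rw [Ne, List.dropWhile_eq_nil_iff]
      intro hall
      have := hall ' ' (List.mem_reverse.mpr hmem)
      simp at this
    have hhead := List.head_dropWhile_not (fun c => decide (c ≠ ' ')) hd
    simp only [decide_eq_false_iff_not, not_not] at hhead
    have hcons : cs.reverse.dropWhile (· ≠ ' ')
        = ' ' :: (cs.reverse.dropWhile (· ≠ ' ')).tail := by
      conv_lhs => rw [← List.cons_head_tail hd]
      rw [hhead]
    refine ⟨(cs.reverse.dropWhile (· ≠ ' ')).tail, ?_⟩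
    calc wl.reverse ++ [' '] ++ (cs.reverse.dropWhile (· ≠ ' ')).tail
        = wl.reverse ++ (' ' :: (cs.reverse.dropWhile (· ≠ ' ')).tail) := by simp
      _ = wl.reverse ++ cs.reverse.dropWhile (· ≠ ' ') := by rw [← hcons]
      _ = cs.reverse.takeWhile (· ≠ ' ') ++ cs.reverse.dropWhile (· ≠ ' ') := by rw [htw]
      _ = cs.reverse := List.takeWhile_append_dropWhile

-- A's endswith test against suffix " "++w, rephrased through the last token
theorem endswith_iff_token (cur w : String) (hne : w.toList ≠ []) (hsp : ' ' ∉ w.toList) :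
    (PySem.Str.endswith (PySem.Str.lower cur) (" " ++ w) = true)
      ↔ (' ' ∈ (PySem.Str.lower cur).toList
          ∧ lastToken (PySem.Str.lower cur).toList = w.toList) := by
  rw [PySem.Str.endswith_eq, PySem.Chars.endswith_iff]
  have : (" " ++ w).toList = ' ' :: w.toList := by simp
  rw [this]
  exact suffix_cons_iff _ _ hne hsp

-- the word list behind both ports' tables
def wordList : List String := [
  "link", "button", "btn", "input", "field", "text",
  "image", "img", "icon", "checkbox", "radio", "dropdown",
  "menu", "tab", "option", "label", "heading", "title"]

theorem suffixes_eq_map : elementTypeSuffixes = wordList.map (fun w => " " ++ w) := by decide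

theorem wordList_ok : ∀ w ∈ wordList, w.toList ≠ [] ∧ ' ' ∉ w.toList := by decide

theorem wordList_nodup : wordList.Nodup := by decide

theorem mem_suffixWords_iff (s : String) : s ∈ suffixWords ↔ s ∈ wordList := by
  rw [suffixWords, PySem.Set.mem_ofList]; rfl

-- A's inner scan over suffixes " "++w, with the membership test made redundant by the
-- length invariant, equals B's rpartition-plus-lookup step (generic over the word list)
theorem findSuffixA_eq_gen (cur : String) (vars : List String) (ws : List String)
    (hws : ∀ w ∈ ws, w.toList ≠ [] ∧ ' ' ∉ w.toList) (hnd : ws.Nodup)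
    (hinv : ∀ v ∈ vars, cur.toList.length ≤ v.toList.length) :
    findSuffixA cur vars (ws.map (fun w => " " ++ w)) =
      (if (' ' ∈ (PySem.Str.lower cur).toList)
          ∧ (String.ofList (lastToken (PySem.Str.lower cur).toList) ∈ ws) then
        (if PySem.Str.strip (PySem.Str.slice cur none
              (some (PySem.Str.len cur
                - ((lastToken (PySem.Str.lower cur).toList).length : Int) - 1))) = ""
          then none
          else some (PySem.Str.strip (PySem.Str.slice cur none
              (some (PySem.Str.len cur
                - ((lastToken (PySem.Str.lower cur).toList).length : Int) - 1)))))
       else none) := by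
  induction ws with
  | nil => simp [findSuffixA]
  | cons w rest ih =>
    have hwok := hws w (by simp)
    have hrest : ∀ w' ∈ rest, w'.toList ≠ [] ∧ ' ' ∉ w'.toList :=
      fun w' hm => hws w' (by simp [hm])
    have hrnd : rest.Nodup := (List.nodup_cons.mp hnd).2
    have hwnr : w ∉ rest := (List.nodup_cons.mp hnd).1
    simp only [List.map_cons]
    rw [findSuffixA]
    by_cases he : PySem.Str.endswith (PySem.Str.lower cur) (" " ++ w) = true
    · -- the head suffix matches: the token is exactly w
      obtain ⟨hmem, htok⟩ := (endswith_iff_token cur w hwok.1 hwok.2).mp he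
      have htokS : String.ofList (lastToken (PySem.Str.lower cur).toList) = w := by
        rw [htok]; exact String.ofList_toList
      have hlenw : PySem.Str.len (" " ++ w) = ((w.toList.length : Int) + 1) := by
        simp only [PySem.Str.len_eq]
        have : (" " ++ w).toList = ' ' :: w.toList := by simp
        rw [this]; push_cast [List.length_cons]; ring
      have hstr : strippedOf cur (" " ++ w)
          = PySem.Str.strip (PySem.Str.slice cur none
              (some (PySem.Str.len cur
                - ((lastToken (PySem.Str.lower cur).toList).length : Int) - 1))) := by
        rw [strippedOf, hlenw, htok]
        have harith : PySem.Str.len cur - ((w.toList.length : Int) + 1)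
            = PySem.Str.len cur - (w.toList.length : Int) - 1 := by ring
        rw [harith]
      rw [if_pos he]
      simp only []
      by_cases hse : strippedOf cur (" " ++ w) = ""
      · -- empty strip: A scans the rest, where the token (= w) can never match again
        have hcond : (strippedOf cur (" " ++ w) != "") = false := by
          simp [hse]
        rw [hcond]
        simp only [Bool.false_and, Bool.false_eq_true, if_false]
        rw [ih hrest hrnd]
        have hnotrest : ¬ (' ' ∈ (PySem.Str.lower cur).toList
            ∧ String.ofList (lastToken (PySem.Str.lower cur).toList) ∈ rest) := by
          intro hc
          rw [htokS] at hc
          exact hwnr hc.2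
        have hin : (' ' ∈ (PySem.Str.lower cur).toList)
            ∧ String.ofList (lastToken (PySem.Str.lower cur).toList) ∈ w :: rest := by
          refine ⟨hmem, ?_⟩; rw [htokS]; simp
        have hemp : PySem.Str.strip (PySem.Str.slice cur none
            (some (PySem.Str.len cur
              - ((lastToken (PySem.Str.lower cur).toList).length : Int) - 1))) = "" := by
          rw [← hstr]; exact hse
        rw [if_neg hnotrest, if_pos hin, if_pos hemp]
      · -- non-empty strip: membership in vars impossible (it is strictly shorter)
        have hlt : (strippedOf cur (" " ++ w)).toList.length < cur.toList.length :=
          strippedOf_lt cur (" " ++ w) (by simp) he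
        have hnm : strippedOf cur (" " ++ w) ∉ vars := by
          intro hmemv
          have := hinv _ hmemv
          omega
        have hcond : (strippedOf cur (" " ++ w) != ""
            && !(vars.contains (strippedOf cur (" " ++ w)))) = true := by
          simp [hse, hnm]
        rw [hcond]
        simp only [if_true]
        have hin : (' ' ∈ (PySem.Str.lower cur).toList)
            ∧ String.ofList (lastToken (PySem.Str.lower cur).toList) ∈ w :: rest := by
          refine ⟨hmem, ?_⟩; rw [htokS]; simp
        have hnemp : ¬ (PySem.Str.strip (PySem.Str.slice cur none
            (some (PySem.Str.len cur
              - ((lastToken (PySem.Str.lower cur).toList).length : Int) - 1))) = "") := by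
          rw [← hstr]; exact hse
        rw [if_pos hin, if_neg hnemp, hstr]
    · -- head suffix does not match: token ≠ w (or no space), recurse
      rw [if_neg he, ih hrest hrnd]
      have hne : ¬ (' ' ∈ (PySem.Str.lower cur).toList
          ∧ lastToken (PySem.Str.lower cur).toList = w.toList) := by
        intro hc; exact he ((endswith_iff_token cur w hwok.1 hwok.2).mpr hc)
      by_cases hall : (' ' ∈ (PySem.Str.lower cur).toList)
          ∧ (String.ofList (lastToken (PySem.Str.lower cur).toList) ∈ w :: rest)
      · have hinrest : String.ofList (lastToken (PySem.Str.lower cur).toList) ∈ rest := by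
          rcases List.mem_cons.mp hall.2 with heq | hmr
          · exfalso
            apply hne
            refine ⟨hall.1, ?_⟩
            have := congrArg String.toList heq
            simpa using this
          · exact hmr
        have h1 : (' ' ∈ (PySem.Str.lower cur).toList)
            ∧ String.ofList (lastToken (PySem.Str.lower cur).toList) ∈ rest :=
          ⟨hall.1, hinrest⟩
        rw [if_pos h1, if_pos hall]
      · rw [if_neg hall]
        rw [if_neg (fun hc => hall ⟨hc.1, List.mem_cons_of_mem _ hc.2⟩)]

-- instantiated at the actual tables: A's scan computes B's step
theorem findSuffixA_eq_bStep (cur : String) (vars : List String)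
    (hinv : ∀ v ∈ vars, cur.toList.length ≤ v.toList.length) :
    findSuffixA cur vars elementTypeSuffixes = bStep cur := by
  rw [suffixes_eq_map, findSuffixA_eq_gen cur vars wordList wordList_ok wordList_nodup hinv,
    bStep]
  simp only [mem_suffixWords_iff]

-- main loop correspondence, by strong induction on the length of `cur`
theorem loop_agree : ∀ (n : Nat) (cur : String) (vars : List String),
    cur.toList.length ≤ n → cur ≠ "" →
    (∀ v ∈ vars ++ [cur], cur.toList.length ≤ v.toList.length) →
    loopA (vars ++ [cur]) cur = bLoop vars cur := by
  intro n
  induction n with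
  | zero =>
    intro cur vars hn hcur _
    exfalso
    apply hcur
    have hnil : cur.toList = [] := List.length_eq_zero_iff.mp (Nat.le_zero.mp hn)
    rw [← String.ofList_toList (s := cur), hnil]
  | succ n ih =>
    intro cur vars hn hcur hinv
    rw [bLoop_unfold vars cur hcur]
    rw [loopA]
    have hstep := findSuffixA_eq_bStep cur (vars ++ [cur]) hinv
    split
    next s heq =>
      rw [hstep] at heq
      rw [heq]
      have hlt := bStep_lt heq
      have hne := bStep_ne_empty heq
      have hinv' : ∀ v ∈ (vars ++ [cur]) ++ [s], s.toList.length ≤ v.toList.length := by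
        intro v hv
        rcases List.mem_append.mp hv with hv | hv
        · exact le_of_lt (lt_of_lt_of_le hlt (hinv v hv))
        · simp only [List.mem_singleton] at hv; subst hv; exact le_refl _
      exact ih s (vars ++ [cur]) (by omega) hne hinv'
    next heq =>
      rw [hstep] at heq
      rw [heq]

-- ===== VERDICT (by name: the statement is the Claim_ definition above) =====
theorem get_target_variations_spec : Claim_equal_get_target_variations := by
  intro target _
  unfold Spec_get_target_variations get_target_variations get_target_variations_alt
  by_cases ht : target = ""
  · subst ht
    rw [if_pos rfl, bLoop]
    simp
  · rw [if_neg ht]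
    have := loop_agree target.toList.length target [] (le_refl _) ht (by simp)
    simpa using this
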